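-- pv_equiv track=rewrite | github.com/pmcfadin/cqlite | cqlite-cli/cqlite-python/python/cqlite/types.py | _split_type_params
-- ===== SOURCE A (Python) =====
-- from typing import Any, Dict, List, Set, Tuple, Union, Optional, Type
--
-- def _split_type_params(params_string: str) -> List[str]:
--     """Split type parameters, handling nested angle brackets."""
--     parts = []
--     current = ""
--     depth = 0
--
--     for char in params_string:
--         if char == '<':
--             depth += 1
--             current += char
--         elif char == '>':
--             depth -= 1
--             current += char
--         elif char == ',' and depth == 0:
--             parts.append(current.strip())
--             current = ""
--         else:
--             current += char
--
--     if current.strip():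
--         parts.append(current.strip())
--
--     return parts
-- ===== SOURCE B (Python) =====
-- def _top_comma(s):
--     """Index of the first comma at angle-bracket depth 0, or None."""
--     depth = 0
--     for i, ch in enumerate(s):
--         if ch == '<':
--             depth += 1
--         elif ch == '>':
--             depth -= 1
--         elif ch == ',' and depth == 0:
--             return i
--     return None
--
--
-- def _segments(s):
--     """Recursively cut s at its first top-level comma."""
--     i = _top_comma(s)
--     if i is None:
--         return [s]
--     return [s[:i]] + _segments(s[i + 1:])
--
--
-- def _split_type_params(params_string):
--     segs = [t.strip() for t in _segments(params_string)]
--     if not segs[-1]: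
--         segs.pop()
--     return segs
-- ===== Notes on version B (the rewrite author's own statement) =====
-- stated objective: alternative
-- what changed: A accumulates a character buffer and a parts list in one pass; B instead recursively locates the first depth-0 comma, slices the string there, recurses on the remainder, then strips all segments and drops a trailing empty one.
import Mathlib
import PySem

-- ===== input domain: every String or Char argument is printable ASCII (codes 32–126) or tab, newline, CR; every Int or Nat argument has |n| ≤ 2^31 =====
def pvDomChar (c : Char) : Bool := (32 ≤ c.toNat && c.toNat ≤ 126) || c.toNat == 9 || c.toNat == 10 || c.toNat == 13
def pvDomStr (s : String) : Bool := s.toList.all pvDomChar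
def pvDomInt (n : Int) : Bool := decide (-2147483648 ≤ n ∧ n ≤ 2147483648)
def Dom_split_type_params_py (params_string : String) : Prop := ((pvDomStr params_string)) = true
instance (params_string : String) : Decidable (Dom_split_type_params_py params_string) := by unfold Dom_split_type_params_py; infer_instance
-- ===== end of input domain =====

-- B replaces A's single-pass character accumulator with recursive splitting at the first
-- top-level comma (objective: alternative decomposition; same cost, not claimed faster).

-- ===== PORT A =====
-- A's for-loop: state (parts, current, depth); then the final 'if current.strip(): append'.
def splitLoopA : List Char → List String → List Char → Int → List String
  | [], parts, current, _depth =>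
      if PySem.Chars.strip current ≠ [] then parts ++ [String.ofList (PySem.Chars.strip current)]
      else parts
  | c :: cs, parts, current, depth =>
      if c = '<' then splitLoopA cs parts (current ++ [c]) (depth + 1)
      else if c = '>' then splitLoopA cs parts (current ++ [c]) (depth - 1)
      else if c = ',' ∧ depth = 0 then
        splitLoopA cs (parts ++ [String.ofList (PySem.Chars.strip current)]) [] depth
      else splitLoopA cs parts (current ++ [c]) depth

def split_type_params_py (params_string : String) : List String :=
  splitLoopA params_string.toList [] [] 0

-- ===== PORT B =====
-- _top_comma: enumerate loop with index accumulator i and depth counter.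
def topCommaB : List Char → Nat → Int → Option Nat
  | [], _, _ => none
  | c :: cs, i, depth =>
      if c = '<' then topCommaB cs (i + 1) (depth + 1)
      else if c = '>' then topCommaB cs (i + 1) (depth - 1)
      else if c = ',' ∧ depth = 0 then some i
      else topCommaB cs (i + 1) depth

-- _segments: slice at the first top-level comma and recurse; s[:i] / s[i+1:] with the
-- returned in-range nonnegative index i are List.take i / List.drop (i+1)
-- (PySem.List.slice_to_natCast / slice_from_natCast). The fuel argument only makes the
-- same recursion structural: each step consumes at least one character, so
-- cs.length + 1 units are always enough and the 0-fuel branch is never reached.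
def segmentsBFuel : Nat → List Char → List (List Char)
  | 0, cs => [cs]
  | fuel + 1, cs =>
      match topCommaB cs 0 0 with
      | none => [cs]
      | some i => cs.take i :: segmentsBFuel fuel (cs.drop (i + 1))

def segmentsB (cs : List Char) : List (List Char) :=
  segmentsBFuel (cs.length + 1) cs

def split_type_params_py_alt (params_string : String) : List String :=
  let segs := (segmentsB params_string.toList).map (fun t => String.ofList (PySem.Chars.strip t))
  if PySem.List.pyGet? segs (-1) = some "" then segs.dropLast else segs

-- ===== PRECONDITION & SPEC =====
def Spec_split_type_params_py (params_string : String) (out : List String) : Prop := out = split_type_params_py_alt params_string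
instance (params_string : String) (out : List String) : Decidable (Spec_split_type_params_py params_string out) := by unfold Spec_split_type_params_py; infer_instance

-- ===== CLAIM (what is proved, stated in full; the proofs are below) =====
def Claim_equal_split_type_params_py : Prop := ∀ (params_string : String), Dom_split_type_params_py params_string → Spec_split_type_params_py params_string (split_type_params_py params_string)

-- ===== LEMMAS AND PROOFS =====

-- Reference decomposition: the list of raw top-level-comma segments of cs (depth carried in d).
def consFstH (c : Char) : List (List Char) → List (List Char)
  | [] => [[c]]
  | s :: ss => (c :: s) :: ss

def splitTopH : Int → List Char → List (List Char)
  | _, [] => [[]]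
  | d, c :: cs =>
      if c = '<' then consFstH c (splitTopH (d + 1) cs)
      else if c = '>' then consFstH c (splitTopH (d - 1) cs)
      else if c = ',' ∧ d = 0 then [] :: splitTopH d cs
      else consFstH c (splitTopH d cs)

def prependFstH (cur : List Char) : List (List Char) → List (List Char)
  | [] => [cur]
  | s :: ss => (cur ++ s) :: ss

-- strip every segment; drop the last one iff it strips to empty
def finishH : List (List Char) → List String
  | [] => []
  | [s] => if PySem.Chars.strip s = [] then [] else [String.ofList (PySem.Chars.strip s)]
  | s :: t :: ss => String.ofList (PySem.Chars.strip s) :: finishH (t :: ss)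

lemma splitTopH_ne_nil (d : Int) (cs : List Char) : splitTopH d cs ≠ [] := by
  induction cs generalizing d with
  | nil => simp [splitTopH]
  | cons c cs ih =>
      simp only [splitTopH]
      split_ifs
      · rcases splitTopH (d + 1) cs with _ | ⟨s, ss⟩ <;> simp [consFstH]
      · rcases splitTopH (d - 1) cs with _ | ⟨s, ss⟩ <;> simp [consFstH]
      · simp
      · rcases splitTopH d cs with _ | ⟨s, ss⟩ <;> simp [consFstH]

lemma finishH_cons (s : List Char) (ss : List (List Char)) (h : ss ≠ []) :
    finishH (s :: ss) = String.ofList (PySem.Chars.strip s) :: finishH ss := by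
  cases ss with
  | nil => exact absurd rfl h
  | cons t ts => rfl

lemma prependFstH_consFstH (cur : List Char) (c : Char) (ss : List (List Char)) :
    prependFstH cur (consFstH c ss) = prependFstH (cur ++ [c]) ss := by
  cases ss <;> simp [consFstH, prependFstH]

lemma prependFstH_nil (ss : List (List Char)) (h : ss ≠ []) : prependFstH [] ss = ss := by
  cases ss with
  | nil => exact absurd rfl h
  | cons s ss => simp [prependFstH]

-- A's loop computes finishH of the segments, with 'cur' glued onto the first one.
lemma loopA_eq : ∀ (cs : List Char) (parts : List String) (cur : List Char) (d : Int),
    splitLoopA cs parts cur d = parts ++ finishH (prependFstH cur (splitTopH d cs)) := by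
  intro cs
  induction cs with
  | nil =>
      intro parts cur d
      simp only [splitLoopA, splitTopH, prependFstH, finishH]
      split_ifs with h1 h2 h3 <;> simp_all
  | cons c cs ih =>
      intro parts cur d
      simp only [splitLoopA, splitTopH]
      split_ifs with h1 h2 h3
      · rw [ih, prependFstH_consFstH]
      · rw [ih, prependFstH_consFstH]
      · rw [ih, prependFstH_nil _ (splitTopH_ne_nil d cs)]
        simp only [prependFstH]
        rw [finishH_cons _ _ (splitTopH_ne_nil d cs)]
        simp
      · rw [ih, prependFstH_consFstH]

-- relative (offset-free) form of topCommaB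
def rtcH : List Char → Int → Option Nat
  | [], _ => none
  | c :: cs, d =>
      if c = '<' then (rtcH cs (d + 1)).map (· + 1)
      else if c = '>' then (rtcH cs (d - 1)).map (· + 1)
      else if c = ',' ∧ d = 0 then some 0
      else (rtcH cs d).map (· + 1)

lemma topCommaB_eq : ∀ (cs : List Char) (k : Nat) (d : Int),
    topCommaB cs k d = (rtcH cs d).map (k + ·) := by
  intro cs
  induction cs with
  | nil => intro k d; simp [topCommaB, rtcH]
  | cons c cs ih =>
      intro k d
      simp only [topCommaB, rtcH]
      split_ifs
      · rw [ih]
        cases rtcH cs (d + 1) with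
        | none => simp
        | some a => simp; omega
      · rw [ih]
        cases rtcH cs (d - 1) with
        | none => simp
        | some a => simp; omega
      · simp
      · rw [ih]
        cases rtcH cs d with
        | none => simp
        | some a => simp; omega

lemma splitTopH_eq_rtc : ∀ (cs : List Char) (d : Int),
    splitTopH d cs = match rtcH cs d with
      | none => [cs]
      | some i => cs.take i :: splitTopH 0 (cs.drop (i + 1)) := by
  intro cs
  induction cs with
  | nil => intro d; simp [splitTopH, rtcH]
  | cons c cs ih =>
      intro d
      simp only [splitTopH, rtcH]
      split_ifs with h1 h2 h3
      · rw [ih (d + 1)]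
        rcases h : rtcH cs (d + 1) with _ | i
        · simp [consFstH]
        · simp [consFstH]
      · rw [ih (d - 1)]
        rcases h : rtcH cs (d - 1) with _ | i
        · simp [consFstH]
        · simp [consFstH]
      · obtain ⟨hc, hd⟩ := h3
        subst hd
        simp
      · rw [ih d]
        rcases h : rtcH cs d with _ | i
        · simp [consFstH]
        · simp [consFstH]

lemma topCommaB_lt : ∀ (cs : List Char) (k : Nat) (d : Int) (i : Nat),
    topCommaB cs k d = some i → i < k + cs.length := by
  intro cs
  induction cs with
  | nil => intro k d i h; simp [topCommaB] at h
  | cons c cs ih =>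
      intro k d i h
      simp only [topCommaB] at h
      split_ifs at h with h1 h2 h3
      · have := ih (k + 1) (d + 1) i h; simp at this ⊢; omega
      · have := ih (k + 1) (d - 1) i h; simp at this ⊢; omega
      · obtain rfl : i = k := by simpa using h.symm
        simp
      · have := ih (k + 1) d i h; simp at this ⊢; omega

lemma segmentsBFuel_eq : ∀ (fuel : Nat) (cs : List Char), cs.length < fuel →
    segmentsBFuel fuel cs = splitTopH 0 cs := by
  intro fuel
  induction fuel with
  | zero => intro cs h; omega
  | succ fuel ih =>
      intro cs hlt
      rw [splitTopH_eq_rtc]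
      simp only [segmentsBFuel]
      cases h : topCommaB cs 0 0 with
      | none =>
          rw [topCommaB_eq] at h
          rcases hr : rtcH cs 0 with _ | i
          · rfl
          · rw [hr] at h; simp at h
      | some i =>
          have hi := topCommaB_lt cs 0 0 i h
          rw [topCommaB_eq] at h
          rcases hr : rtcH cs 0 with _ | j
          · rw [hr] at h; simp at h
          · rw [hr] at h
            simp at h
            have hji : j = i := by omega
            subst hji
            have hrec := ih (cs.drop (j + 1)) (by simp; omega)
            simp [hrec]

lemma segmentsB_eq (cs : List Char) : segmentsB cs = splitTopH 0 cs :=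
  segmentsBFuel_eq (cs.length + 1) cs (by omega)

-- B's strip-then-drop-trailing-empty equals finishH on a nonempty segment list.
lemma stripDrop_eq_finishH : ∀ (ss : List (List Char)), ss ≠ [] →
    (let segs := ss.map (fun t => String.ofList (PySem.Chars.strip t))
     if PySem.List.pyGet? segs (-1) = some "" then segs.dropLast else segs) = finishH ss := by
  intro ss
  induction ss with
  | nil => intro h; exact absurd rfl h
  | cons s ss ih =>
      intro _
      cases ss with
      | nil =>
          simp only [List.map, PySem.List.pyGet?_neg_one _, List.getLast?, finishH]
          by_cases h : PySem.Chars.strip s = []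
          · simp [h]
          · have hne : String.ofList (PySem.Chars.strip s) ≠ "" := by
              intro he
              exact h (by simpa using congrArg String.toList he)
            simp [h, hne]
      | cons t ts =>
          have hrec := ih (by simp)
          simp only at hrec
          rw [finishH_cons _ _ (by simp), ← hrec]
          simp only [List.map_cons, PySem.List.pyGet?_neg_one _, List.getLast?_cons_cons]
          split_ifs
          · rw [List.dropLast_cons_of_ne_nil (by simp)]
          · rfl

-- ===== VERDICT (by name: the statement is the Claim_ definition above) =====
theorem split_type_params_py_spec : Claim_equal_split_type_params_py := by
  intro s _
  unfold Spec_split_type_params_py split_type_params_py split_type_params_py_alt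
  rw [loopA_eq, prependFstH_nil _ (splitTopH_ne_nil 0 s.toList), segmentsB_eq,
      stripDrop_eq_finishH _ (splitTopH_ne_nil 0 s.toList)]
  simp
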